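-- pv_equiv track=rewrite | github.com/Serhii04/NTA_python-2023-volynets_fi-03 | src/nta_algorithms.py | smolarise_matrix
-- ===== SOURCE A (Python) =====
-- def smolarise_matrix(matrix):
--     rez_matrix = [list() for i in range(len(matrix))]
--     for c in range(len(matrix[0])):
--         column_is_nul = True
--         for l in range(len(matrix)):
--             if matrix[l][c] != 0:
--                 column_is_nul = False
--
--         if not column_is_nul:
--             for l in range(len(matrix)):
--                 rez_matrix[l].append(matrix[l][c])
--
--     return rez_matrix
-- ===== SOURCE B (Python) =====
-- def smolarise_matrix(matrix):
--     width = len(matrix[0])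
--     nonzero = set()
--     for row in matrix:
--         for j, x in enumerate(row[:width]):
--             if x != 0:
--                 nonzero.add(j)
--     keep = sorted(nonzero)
--     return [[row[j] for j in keep] for row in matrix]
-- ===== Notes on version B (the rewrite author's own statement) =====
-- stated objective: alternative
-- what changed: Instead of A's column-major nested index loops with per-row appends, B makes one row-major pass collecting the set of column indices that hold a nonzero entry, sorts that index set, and then gathers each output row by indexing the kept columns.
import Mathlib
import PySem

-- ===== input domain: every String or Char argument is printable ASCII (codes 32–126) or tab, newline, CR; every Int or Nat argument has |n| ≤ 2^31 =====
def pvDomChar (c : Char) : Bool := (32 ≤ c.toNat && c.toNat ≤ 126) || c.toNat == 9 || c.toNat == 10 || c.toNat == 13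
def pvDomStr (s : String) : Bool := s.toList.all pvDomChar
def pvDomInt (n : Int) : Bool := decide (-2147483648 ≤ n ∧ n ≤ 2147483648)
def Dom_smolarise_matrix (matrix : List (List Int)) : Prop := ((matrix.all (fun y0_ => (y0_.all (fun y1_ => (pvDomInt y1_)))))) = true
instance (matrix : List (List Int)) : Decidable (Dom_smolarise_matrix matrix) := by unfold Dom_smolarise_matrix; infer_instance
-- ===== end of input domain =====

-- B replaces A's column-major nested index loops by one row-major pass that collects
-- the set of nonzero column indices, sorts it, and gathers the kept columns per row;
-- the equivalence is about return values only (A mutates nothing observable).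

-- ===== PORT A =====
-- literal transliteration of A: per-column scan with an inner all-zero check and per-row appends
def smolarise_matrix (matrix : List (List Int)) : List (List Int) :=
  let rez0 : List (List Int) := matrix.map (fun _ => [])
  (PySem.List.pyRange 0 ((PySem.List.pyGetD matrix 0 []).length : Int) 1).foldl
    (fun rez c =>
      let column_is_nul : Bool :=
        (PySem.List.pyRange 0 (matrix.length : Int) 1).foldl
          (fun b l => if PySem.List.pyGetD (PySem.List.pyGetD matrix l []) c 0 ≠ 0 then false else b)
          true
      if !column_is_nul then
        List.zipWith (fun r mrow => r ++ [PySem.List.pyGetD mrow c 0]) rez matrix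
      else rez)
    rez0

-- ===== PORT B =====
-- row-major pass: the set of column indices (< width) holding a nonzero entry
def smolarise_matrix_alt (matrix : List (List Int)) : List (List Int) :=
  let width := (matrix.headD []).length
  let nonzero : PySem.Set Int :=
    matrix.foldl
      (fun s row =>
        (PySem.List.enumerate (row.take width)).foldl
          (fun s p => if p.2 ≠ 0 then PySem.Set.add s p.1 else s) s)
      PySem.Set.empty
  let keep := PySem.List.sorted nonzero (fun x => x) false
  matrix.map (fun row => keep.map (fun j => PySem.List.pyGetD row j 0))

-- ===== PRECONDITION & SPEC =====
-- Pre_ excludes exactly the inputs where A raises IndexError: the empty matrix (matrix[0])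
-- and matrices where some row is shorter than row 0 (matrix[l][c] out of range).
def Pre_smolarise_matrix (matrix : List (List Int)) : Prop :=
  matrix ≠ [] ∧ ∀ row ∈ matrix, (matrix.headD []).length ≤ row.length
instance (matrix : List (List Int)) : Decidable (Pre_smolarise_matrix matrix) := by
  unfold Pre_smolarise_matrix; infer_instance

def pvWitness_smolarise_matrix : List (List Int) := [[0, 1, 0], [0, 2, 3]]

def Spec_smolarise_matrix (matrix : List (List Int)) (out : List (List Int)) : Prop :=
  out = smolarise_matrix_alt matrix
instance (matrix : List (List Int)) (out : List (List Int)) : Decidable (Spec_smolarise_matrix matrix out) := by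
  unfold Spec_smolarise_matrix; infer_instance

-- ===== CLAIM (what is proved, stated in full; the proofs are below) =====
def Claim_equal_smolarise_matrix : Prop :=
  ∀ (matrix : List (List Int)), Dom_smolarise_matrix matrix →
    Pre_smolarise_matrix matrix → Spec_smolarise_matrix matrix (smolarise_matrix matrix)

-- ===== LEMMAS AND PROOFS =====

-- the inner column_is_nul loop is the negated any-nonzero test over the rows
theorem pv_foldl_nul (M : List (List Int)) (c : Int) (b : Bool) :
    M.foldl (fun b row => if PySem.List.pyGetD row c 0 ≠ 0 then false else b) b
      = (b && !M.any (fun row => decide (PySem.List.pyGetD row c 0 ≠ 0))) := by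
  induction M generalizing b with
  | nil => simp
  | cons r rs ih =>
    simp only [List.foldl_cons, List.any_cons, ih]
    by_cases h : PySem.List.pyGetD r c 0 ≠ 0 <;> simp [h]

theorem pv_zipWith_map_left_same {α β γ : Type} (f : β → α → γ) (g : α → β) (l : List α) :
    List.zipWith f (l.map g) l = l.map (fun x => f (g x) x) := by
  induction l with
  | nil => rfl
  | cons x xs ih => simp [ih]

-- characterisation of A's outer fold: rows are the kept columns' entries, in column order
theorem pv_A_char (M : List (List Int)) (w : Nat) :
    (PySem.List.pyRange 0 (w : Int) 1).foldl
      (fun rez c =>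
        let column_is_nul : Bool :=
          (PySem.List.pyRange 0 (M.length : Int) 1).foldl
            (fun b l => if PySem.List.pyGetD (PySem.List.pyGetD M l []) c 0 ≠ 0 then false else b)
            true
        if !column_is_nul then
          List.zipWith (fun r mrow => r ++ [PySem.List.pyGetD mrow c 0]) rez M
        else rez)
      (M.map (fun _ => []))
    = M.map (fun row =>
        (((List.range w).filter (fun k => M.any (fun row => decide (row.getD k 0 ≠ 0)))).map
          (fun k => row.getD k 0))) := by
  induction w with
  | zero => simp [PySem.List.pyRange_zero_nat]
  | succ w ih =>
    have hsplit : PySem.List.pyRange 0 ((w + 1 : Nat) : Int) 1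
        = PySem.List.pyRange 0 (w : Int) 1 ++ [(w : Int)] := by
      push_cast
      exact PySem.List.pyRange_one_succ_right (by positivity)
    rw [hsplit, List.foldl_append, ih]
    simp only [List.foldl_cons, List.foldl_nil]
    rw [PySem.List.foldl_pyRange_zero_pyGetD' M ([] : List Int)
      (fun b row => if PySem.List.pyGetD row (w : Int) 0 ≠ 0 then false else b) true]
    rw [pv_foldl_nul]
    have hG : ∀ row : List Int, PySem.List.pyGetD row ((w : Nat) : Int) 0 = row.getD w 0 := by
      intro row; simp [PySem.List.pyGetD_natCast]
    have hany : (M.any (fun row => decide (PySem.List.pyGetD row ((w : Nat) : Int) 0 ≠ 0)))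
        = (M.any (fun row => decide (row.getD w 0 ≠ 0))) := by
      simp only [hG]
    rw [List.range_succ, List.filter_append]
    have hk' : (M.any fun row => decide (row.getD w 0 ≠ 0)) = true
        ∨ (M.any fun row => decide (row.getD w 0 ≠ 0)) = false := by
      cases M.any fun row => decide (row.getD w 0 ≠ 0) <;> simp
    rcases hk' with hk | hk
    · simp only [hany, hk, Bool.true_and, Bool.not_true, Bool.not_false, if_pos]
      rw [pv_zipWith_map_left_same]
      refine List.map_congr_left (fun row _ => ?_)
      have hf : (List.filter (fun k => M.any fun row => decide (row.getD k 0 ≠ 0)) [w]) = [w] := by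
        simp only [List.filter, hk]
      rw [hf, hG]
      simp
    · simp only [hany, hk, Bool.true_and, Bool.not_false, Bool.not_true]
      refine List.map_congr_left (fun row _ => ?_)
      have hf : (List.filter (fun k => M.any fun row => decide (row.getD k 0 ≠ 0)) [w]) = [] := by
        simp only [List.filter, hk]
      rw [hf]
      simp

-- membership in B's inner conditional-add loop
theorem pv_inner_mem (L : List (Int × Int)) (s : PySem.Set Int) (x : Int) :
    x ∈ L.foldl (fun s p => if p.2 ≠ 0 then PySem.Set.add s p.1 else s) s
      ↔ x ∈ s ∨ ∃ p ∈ L, p.2 ≠ 0 ∧ x = p.1 := by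
  induction L generalizing s with
  | nil => simp
  | cons p ps ih =>
    simp only [List.foldl_cons]
    rw [ih]
    by_cases h : p.2 = 0
    · simp [h]
    · simp only [h, ne_eq, not_false_eq_true, if_true, PySem.Set.mem_add, List.mem_cons]
      constructor
      · rintro ((hx | hx) | ⟨q, hq, h2, h3⟩)
        · exact Or.inl hx
        · exact Or.inr ⟨p, Or.inl rfl, h, hx⟩
        · exact Or.inr ⟨q, Or.inr hq, h2, h3⟩
      · rintro (hx | ⟨q, (rfl | hq), h2, h3⟩)
        · exact Or.inl (Or.inl hx)
        · exact Or.inl (Or.inr h3)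
        · exact Or.inr ⟨q, hq, h2, h3⟩

-- the inner loop preserves the set invariant (no duplicates)
theorem pv_inner_nodup (L : List (Int × Int)) (s : PySem.Set Int) (hs : s.Nodup) :
    (L.foldl (fun s p => if p.2 ≠ 0 then PySem.Set.add s p.1 else s) s).Nodup := by
  induction L generalizing s with
  | nil => exact hs
  | cons p ps ih =>
    simp only [List.foldl_cons]
    by_cases h : p.2 ≠ 0
    · rw [if_pos h]; exact ih (PySem.Set.add s p.1) (PySem.Set.nodup_add s p.1 hs)
    · rw [if_neg h]; exact ih _ hs

-- membership in B's outer row loop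
theorem pv_outer_mem (M : List (List Int)) (w : Nat) (s : PySem.Set Int) (x : Int) :
    x ∈ M.foldl (fun s row =>
        (PySem.List.enumerate (row.take w)).foldl
          (fun s p => if p.2 ≠ 0 then PySem.Set.add s p.1 else s) s) s
      ↔ x ∈ s ∨ ∃ row ∈ M, ∃ p ∈ PySem.List.enumerate (row.take w), p.2 ≠ 0 ∧ x = p.1 := by
  induction M generalizing s with
  | nil => simp
  | cons r rs ih =>
    simp only [List.foldl_cons, ih, pv_inner_mem, List.mem_cons]
    constructor
    · rintro ((h | h) | ⟨row, hr, hq⟩)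
      · exact Or.inl h
      · exact Or.inr ⟨r, Or.inl rfl, h⟩
      · exact Or.inr ⟨row, Or.inr hr, hq⟩
    · rintro (h | ⟨row, (rfl | hr), hq⟩)
      · exact Or.inl (Or.inl h)
      · exact Or.inl (Or.inr hq)
      · exact Or.inr ⟨row, hr, hq⟩

theorem pv_outer_nodup (M : List (List Int)) (w : Nat) (s : PySem.Set Int) (hs : s.Nodup) :
    (M.foldl (fun s row =>
        (PySem.List.enumerate (row.take w)).foldl
          (fun s p => if p.2 ≠ 0 then PySem.Set.add s p.1 else s) s) s).Nodup := by
  induction M generalizing s with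
  | nil => exact hs
  | cons r rs ih => exact ih _ (pv_inner_nodup _ _ hs)

-- enumerate of a full-width prefix: the pairs are (k, row[k]) for k < w
theorem pv_enum_take (row : List Int) (w : Nat) (hw : w ≤ row.length) (x : Int) :
    (∃ p ∈ PySem.List.enumerate (row.take w), p.2 ≠ 0 ∧ x = p.1)
      ↔ ∃ k : Nat, k < w ∧ row.getD k 0 ≠ 0 ∧ x = (k : Int) := by
  constructor
  · rintro ⟨p, hp, hnz, hx⟩
    rw [PySem.List.mem_enumerate_iff] at hp
    obtain ⟨k, hk, rfl⟩ := hp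
    have hkw : k < w := by simpa [hw] using hk
    refine ⟨k, hkw, ?_, by simpa using hx⟩
    have : (row.take w)[k] = row[k]'(by omega) := List.getElem_take
    simp only [this] at hnz
    rwa [List.getD_eq_getElem row 0 (by omega)]
  · rintro ⟨k, hkw, hnz, rfl⟩
    have hk : k < (row.take w).length := by simp; omega
    refine ⟨(0 + (k : Int), (row.take w)[k]), ?_, ?_, by simp⟩
    · rw [PySem.List.mem_enumerate_iff]; exact ⟨k, hk, rfl⟩
    · have : (row.take w)[k] = row[k]'(by omega) := List.getElem_take
      rw [this]
      rwa [List.getD_eq_getElem row 0 (by omega)] at hnz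

-- ===== VERDICT (by name: the statement is the Claim_ definition above) =====
theorem smolarise_matrix_spec : Claim_equal_smolarise_matrix := by
  intro matrix _ hpre
  obtain ⟨hne, hlen⟩ := hpre
  unfold Spec_smolarise_matrix smolarise_matrix smolarise_matrix_alt
  set w := (matrix.headD []).length with hwdef
  have hget0 : PySem.List.pyGetD matrix 0 [] = matrix.headD [] := by
    cases matrix with
    | nil => exact absurd rfl hne
    | cons r rs => simp [PySem.List.pyGetD_zero_cons]
  rw [hget0, ← hwdef, pv_A_char matrix w]
  set P : Nat → Bool := fun k => matrix.any (fun row => decide (row.getD k 0 ≠ 0)) with hP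
  set cs := (List.range w).filter P with hcs
  set ys : List Int := List.map (Nat.cast : Nat → Int) cs with hys
  set nz := matrix.foldl
      (fun s row =>
        (PySem.List.enumerate (row.take w)).foldl
          (fun s p => if p.2 ≠ 0 then PySem.Set.add s p.1 else s) s)
      PySem.Set.empty with hnz
  have hysmem : ∀ x : Int, x ∈ ys ↔ ∃ k : Nat, k < w ∧ P k ∧ x = (k : Int) := by
    intro x
    simp only [hys, hcs, List.mem_map, List.mem_filter, List.mem_range]
    constructor
    · rintro ⟨k, ⟨hk, hp⟩, rfl⟩; exact ⟨k, hk, hp, rfl⟩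
    · rintro ⟨k, hk, hp, rfl⟩; exact ⟨k, ⟨hk, hp⟩, rfl⟩
  
  have hnzmem : ∀ x : Int, x ∈ nz ↔ ∃ k : Nat, k < w ∧ P k ∧ x = (k : Int) := by
    intro x
    rw [hnz, pv_outer_mem]
    simp only [PySem.Set.empty, List.not_mem_nil, false_or]
    constructor
    · rintro ⟨row, hrow, hp⟩
      rw [pv_enum_take row w (hlen row hrow)] at hp
      obtain ⟨k, hkw, hnz0, rfl⟩ := hp
      exact ⟨k, hkw, by simp [hP, List.any_eq_true]; exact ⟨row, hrow, hnz0⟩, rfl⟩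
    · rintro ⟨k, hkw, hp, rfl⟩
      simp only [hP, List.any_eq_true, decide_eq_true_eq] at hp
      obtain ⟨row, hrow, hnz0⟩ := hp
      exact ⟨row, hrow, (pv_enum_take row w (hlen row hrow) _).mpr ⟨k, hkw, hnz0, rfl⟩⟩
  have hysnd : ys.Pairwise (fun a b => a < b) := by
    have h1 : cs.Pairwise (fun a b => a < b) :=
      (List.pairwise_lt_range).filter _
    exact List.pairwise_map.mpr (h1.imp (by intro a b h; exact_mod_cast h))
  have hperm : ys.Perm nz := by
    refine (List.perm_ext_iff_of_nodup (List.Pairwise.imp ne_of_lt hysnd) ?_).mpr ?_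
    · exact pv_outer_nodup _ _ _ (by simp [PySem.Set.empty])
    · intro x; rw [hysmem, hnzmem]
  have hsorted : PySem.List.sorted nz (fun x => x) false = ys :=
    PySem.List.sorted_eq_of_perm_of_pairwise_lt _ _ _ hperm hysnd
  dsimp only
  rw [hsorted]
  refine List.map_congr_left (fun row _ => ?_)
  rw [hys, List.map_map]
  
  refine List.map_congr_left (fun k _ => ?_)
  simp [PySem.List.pyGetD_natCast]
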